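-- pv_equiv track=rewrite | github.com/priyanshusharma05/AI-Blog-To-Podcast-Agent-With-3D-Avatar | BlogExtraction&ConversationalScriptGenration/generate_voice.py | build_tts_segments
-- ===== SOURCE A (Python) =====
-- TTS_MIN_SEGMENT_LENGTH = 200
--
-- TTS_MAX_SEGMENT_LENGTH = 350
--
-- def build_tts_segments(sentences: list[str]) -> list[str]:
--     segments: list[str] = []
--     current_segment = ""
--
--     for sentence in sentences:
--         proposed_segment = sentence if not current_segment else f"{current_segment} {sentence}"
--
--         if len(proposed_segment) <= TTS_MAX_SEGMENT_LENGTH: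
--             current_segment = proposed_segment
--             continue
--
--         if current_segment:
--             segments.append(current_segment.strip())
--             current_segment = sentence
--         else:
--             segments.append(sentence.strip())
--             current_segment = ""
--
--     if current_segment:
--         segments.append(current_segment.strip())
--
--     merged_segments: list[str] = []
--     for segment in segments:
--         if (
--             merged_segments
--             and len(segment) < TTS_MIN_SEGMENT_LENGTH
--             and len(merged_segments[-1]) + 1 + len(segment) <= TTS_MAX_SEGMENT_LENGTH
--         ):
--             merged_segments[-1] = f"{merged_segments[-1]} {segment}"
--         else:
--             merged_segments.append(segment)
--
--     return merged_segments
-- ===== SOURCE B (Python) =====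
-- TTS_MIN_SEGMENT_LENGTH = 200
--
-- TTS_MAX_SEGMENT_LENGTH = 350
--
--
-- def build_tts_segments(sentences: list[str]) -> list[str]:
--     # Single fused pass: segments are merged into the output as soon as they
--     # are finalized, so no intermediate segment list is built.
--     out: list[str] = []
--     current = ""
--
--     def emit(seg: str) -> None:
--         if (
--             out
--             and len(seg) < TTS_MIN_SEGMENT_LENGTH
--             and len(out[-1]) + 1 + len(seg) <= TTS_MAX_SEGMENT_LENGTH
--         ):
--             out[-1] = f"{out[-1]} {seg}"
--         else:
--             out.append(seg)
--
--     for sentence in sentences: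
--         proposed = sentence if not current else f"{current} {sentence}"
--         if len(proposed) <= TTS_MAX_SEGMENT_LENGTH:
--             current = proposed
--         elif current:
--             emit(current.strip())
--             current = sentence
--         else:
--             emit(sentence.strip())
--             current = ""
--
--     if current:
--         emit(current.strip())
--     return out
-- ===== Notes on version B (the rewrite author's own statement) =====
-- stated objective: alternative
-- what changed: The two passes (pack sentences into segments, then merge short segments) are fused into one loop that applies the merge rule the moment a segment is finalized, eliminating the intermediate segments list.
import Mathlib
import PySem

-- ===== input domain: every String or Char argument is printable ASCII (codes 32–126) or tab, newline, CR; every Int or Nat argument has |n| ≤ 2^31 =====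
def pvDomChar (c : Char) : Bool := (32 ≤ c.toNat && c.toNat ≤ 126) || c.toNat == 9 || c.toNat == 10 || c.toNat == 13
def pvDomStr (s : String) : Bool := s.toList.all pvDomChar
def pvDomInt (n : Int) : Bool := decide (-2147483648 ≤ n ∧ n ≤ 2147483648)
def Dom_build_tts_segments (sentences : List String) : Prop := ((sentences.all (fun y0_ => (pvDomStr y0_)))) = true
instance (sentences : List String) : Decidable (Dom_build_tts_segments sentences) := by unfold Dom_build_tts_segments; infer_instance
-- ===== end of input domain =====

-- B fuses A's two passes (pack, then merge) into one loop that merges each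
-- segment into the output as soon as it is finalized; same output, no
-- intermediate segments list (objective: alternative decomposition).

-- ===== PORT A =====
-- A, pass 1: fold packing sentences into (segments, current_segment)
def pvPackStep (st : List String × String) (sentence : String) : List String × String :=
  let proposed := if st.2 = "" then sentence else st.2 ++ " " ++ sentence
  if PySem.Str.len proposed ≤ 350 then (st.1, proposed)
  else if st.2 ≠ "" then (st.1 ++ [PySem.Str.strip st.2], sentence)
  else (st.1 ++ [PySem.Str.strip sentence], "")

def build_tts_segments (sentences : List String) : List String :=
  let st := sentences.foldl pvPackStep ([], "")
  let segments := if st.2 ≠ "" then st.1 ++ [PySem.Str.strip st.2] else st.1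
  -- A, pass 2: merge short segments into the previous merged segment
  segments.foldl (fun merged seg =>
    match merged.getLast? with
    | some last =>
      if PySem.Str.len seg < 200 ∧ PySem.Str.len last + 1 + PySem.Str.len seg ≤ 350
      then merged.dropLast ++ [last ++ " " ++ seg]
      else merged ++ [seg]
    | none => merged ++ [seg]) []

-- ===== PORT B =====
-- B's emit: merge the finalized segment into the running output at once
def pvEmit (out : List String) (seg : String) : List String :=
  match out.getLast? with
  | some last =>
    if PySem.Str.len seg < 200 ∧ PySem.Str.len last + 1 + PySem.Str.len seg ≤ 350
    then out.dropLast ++ [last ++ " " ++ seg]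
    else out ++ [seg]
  | none => out ++ [seg]

def pvFusedStep (st : List String × String) (sentence : String) : List String × String :=
  let proposed := if st.2 = "" then sentence else st.2 ++ " " ++ sentence
  if PySem.Str.len proposed ≤ 350 then (st.1, proposed)
  else if st.2 ≠ "" then (pvEmit st.1 (PySem.Str.strip st.2), sentence)
  else (pvEmit st.1 (PySem.Str.strip sentence), "")

def build_tts_segments_alt (sentences : List String) : List String :=
  let st := sentences.foldl pvFusedStep ([], "")
  if st.2 ≠ "" then pvEmit st.1 (PySem.Str.strip st.2) else st.1

-- ===== PRECONDITION & SPEC =====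
def Spec_build_tts_segments (sentences : List String) (out : List String) : Prop := out = build_tts_segments_alt sentences
instance (sentences : List String) (out : List String) : Decidable (Spec_build_tts_segments sentences out) := by unfold Spec_build_tts_segments; infer_instance

-- ===== CLAIM (what is proved, stated in full; the proofs are below) =====
def Claim_equal_build_tts_segments : Prop := ∀ (sentences : List String), Dom_build_tts_segments sentences → Spec_build_tts_segments sentences (build_tts_segments sentences)

-- ===== LEMMAS AND PROOFS =====

-- A's merge pass is a left fold of pvEmit
theorem pvMergeFold_eq (segs : List String) (acc : List String) :
    segs.foldl (fun merged seg =>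
      match merged.getLast? with
      | some last =>
        if PySem.Str.len seg < 200 ∧ PySem.Str.len last + 1 + PySem.Str.len seg ≤ 350
        then merged.dropLast ++ [last ++ " " ++ seg]
        else merged ++ [seg]
      | none => merged ++ [seg]) acc = segs.foldl pvEmit acc := by
  induction segs generalizing acc with
  | nil => rfl
  | cons s t ih => simp only [List.foldl_cons, pvEmit]; exact ih _

-- per-step relation: the fused step emits exactly what the pack step appends
theorem pvStepRel (segs : List String) (cur s : String) :
    pvFusedStep (segs.foldl pvEmit [], cur) s
      = ((pvPackStep (segs, cur) s).1.foldl pvEmit [], (pvPackStep (segs, cur) s).2) := by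
  unfold pvFusedStep pvPackStep
  split_ifs <;> simp_all <;> split_ifs <;> simp [List.foldl_append]

-- fold fusion: B's fused fold tracks (merged prefix of A's segments, A's current)
theorem pvFusion (sentences : List String) (segs : List String) (cur : String) :
    sentences.foldl pvFusedStep (segs.foldl pvEmit [], cur)
      = ((sentences.foldl pvPackStep (segs, cur)).1.foldl pvEmit [],
         (sentences.foldl pvPackStep (segs, cur)).2) := by
  induction sentences generalizing segs cur with
  | nil => rfl
  | cons s t ih =>
    rw [List.foldl_cons, List.foldl_cons, pvStepRel]
    exact ih _ _

-- ===== VERDICT (by name: the statement is the Claim_ definition above) =====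
theorem build_tts_segments_spec : Claim_equal_build_tts_segments := by
  intro sentences _
  unfold Spec_build_tts_segments build_tts_segments build_tts_segments_alt
  rw [pvMergeFold_eq]
  have h := pvFusion sentences [] ""
  simp only [List.foldl_nil] at h
  rw [h]
  by_cases hc : (List.foldl pvPackStep ([], "") sentences).2 = ""
  · simp [hc]
  · simp [hc, List.foldl_append]
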